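-- pv_equiv track=rewrite | github.com/JuanCS-Dev/twitch-v-bot | bot/byte_semantics_quality.py | _count_focus_overlap
-- ===== SOURCE A (Python) =====
-- def _count_focus_overlap(focus_terms: list[str], answer_tokens: set[str]) -> int:
--     if not focus_terms or not answer_tokens:
--         return 0
--     overlap = 0
--     for focus_term in focus_terms:
--         if focus_term in answer_tokens:
--             overlap += 1
--             continue
--         focus_prefix = focus_term[:5]
--         if len(focus_prefix) < 4:
--             continue
--         if any(
--             token.startswith(focus_prefix) or focus_term.startswith(token[:5])
--             for token in answer_tokens
--             if len(token) >= 4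
--         ):
--             overlap += 1
--     return overlap
-- ===== SOURCE B (Python) =====
-- def _count_focus_overlap(focus_terms: list[str], answer_tokens: set[str]) -> int:
--     # One pass over the tokens builds three hash sets of short prefixes, then each
--     # focus term is answered with O(1) lookups instead of scanning all tokens:
--     # "token.startswith(term[:5]) or term.startswith(token[:5])" (both lengths >= 4)
--     # holds iff the two <=5-char prefixes agree on the shorter one's length.
--     if not focus_terms or not answer_tokens:
--         return 0
--     tokens = set(answer_tokens)
--     pref5 = {t[:5] for t in tokens if len(t) >= 5}
--     exact4 = {t for t in tokens if len(t) == 4}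
--     pref4 = {t[:4] for t in tokens if len(t) >= 4}
--     overlap = 0
--     for term in focus_terms:
--         if term in tokens:
--             overlap += 1
--         elif len(term) >= 5:
--             if term[:5] in pref5 or term[:4] in exact4:
--                 overlap += 1
--         elif len(term) == 4:
--             if term in pref4:
--                 overlap += 1
--     return overlap
-- ===== Notes on version B (the rewrite author's own statement) =====
-- stated objective: faster
-- what changed: Replaces the inner scan of all answer tokens per focus term with three precomputed hash sets of (<=5-char) token prefixes, so each focus term is decided by O(1) set lookups; relies on the fact that the mutual-startswith test on 5-char prefixes reduces to equality of prefixes on the shorter length.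
import Mathlib
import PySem

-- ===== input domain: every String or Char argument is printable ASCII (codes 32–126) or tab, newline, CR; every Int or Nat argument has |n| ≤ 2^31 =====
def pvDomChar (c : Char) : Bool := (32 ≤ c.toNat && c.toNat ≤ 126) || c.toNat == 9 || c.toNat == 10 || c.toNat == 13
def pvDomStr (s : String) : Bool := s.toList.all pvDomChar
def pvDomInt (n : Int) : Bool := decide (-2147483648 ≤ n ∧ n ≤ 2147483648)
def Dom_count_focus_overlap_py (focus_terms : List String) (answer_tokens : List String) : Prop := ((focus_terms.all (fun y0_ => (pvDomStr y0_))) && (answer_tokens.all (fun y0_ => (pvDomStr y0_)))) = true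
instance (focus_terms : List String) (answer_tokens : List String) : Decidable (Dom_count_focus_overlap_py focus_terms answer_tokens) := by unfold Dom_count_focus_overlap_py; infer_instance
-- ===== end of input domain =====

-- B replaces A's inner scan of all answer tokens per focus term with three
-- precomputed sets of (≤ 5-char) token prefixes queried per focus term.

-- ===== PORT A =====
def count_focus_overlap_py (focus_terms : List String) (answer_tokens : List String) : Int :=
  if focus_terms.isEmpty || answer_tokens.isEmpty then 0
  else
    focus_terms.foldl (fun overlap focus_term =>
      if answer_tokens.contains focus_term then overlap + 1
      else
        let focus_prefix := PySem.Str.slice focus_term none (some 5)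
        if PySem.Str.len focus_prefix < 4 then overlap
        else if answer_tokens.any (fun token =>
            decide (4 ≤ PySem.Str.len token) &&
            (PySem.Str.startswith token focus_prefix ||
             PySem.Str.startswith focus_term (PySem.Str.slice token none (some 5))))
        then overlap + 1 else overlap) 0

-- ===== PORT B =====
def count_focus_overlap_py_alt (focus_terms : List String) (answer_tokens : List String) : Int :=
  if focus_terms.isEmpty || answer_tokens.isEmpty then 0
  else
    let tokens : PySem.Set String := PySem.Set.ofList answer_tokens
    let pref5 : PySem.Set String := PySem.Set.ofList
      ((tokens.filter (fun t => decide (5 ≤ PySem.Str.len t))).map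
        (fun t => PySem.Str.slice t none (some 5)))
    let exact4 : PySem.Set String := PySem.Set.ofList
      (tokens.filter (fun t => decide (PySem.Str.len t = 4)))
    let pref4 : PySem.Set String := PySem.Set.ofList
      ((tokens.filter (fun t => decide (4 ≤ PySem.Str.len t))).map
        (fun t => PySem.Str.slice t none (some 4)))
    focus_terms.foldl (fun overlap term =>
      if PySem.Set.contains tokens term then overlap + 1
      else if 5 ≤ PySem.Str.len term then
        if PySem.Set.contains pref5 (PySem.Str.slice term none (some 5)) ||
           PySem.Set.contains exact4 (PySem.Str.slice term none (some 4)) then overlap + 1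
        else overlap
      else if PySem.Str.len term = 4 then
        if PySem.Set.contains pref4 term then overlap + 1 else overlap
      else overlap) 0

-- ===== PRECONDITION & SPEC =====
def Spec_count_focus_overlap_py (focus_terms : List String) (answer_tokens : List String) (out : Int) : Prop := out = count_focus_overlap_py_alt focus_terms answer_tokens
instance (focus_terms : List String) (answer_tokens : List String) (out : Int) : Decidable (Spec_count_focus_overlap_py focus_terms answer_tokens out) := by unfold Spec_count_focus_overlap_py; infer_instance

-- ===== CLAIM (what is proved, stated in full; the proofs are below) =====
def Claim_equal_count_focus_overlap_py : Prop := ∀ (focus_terms : List String) (answer_tokens : List String), Dom_count_focus_overlap_py focus_terms answer_tokens → Spec_count_focus_overlap_py focus_terms answer_tokens (count_focus_overlap_py focus_terms answer_tokens)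

-- ===== LEMMAS AND PROOFS =====

-- A's per-token test, when the focus term has length ≥ 5: the mutual-startswith
-- disjunction is equality of 5-char prefixes, or the token is the term's 4-char prefix.
theorem pv_tok5 (s t : List Char) (hs : 5 ≤ s.length) (ht : 4 ≤ t.length) :
    (s.take 5 <+: t ∨ t.take 5 <+: s) ↔
      ((5 ≤ t.length ∧ t.take 5 = s.take 5) ∨ (t.length = 4 ∧ t = s.take 4)) := by
  constructor
  · rintro (h | h)
    · rw [List.prefix_iff_eq_take] at h
      have hl : (s.take 5).length = 5 := by simp; omega
      rw [hl] at h
      have h5t : 5 ≤ t.length := by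
        have := congrArg List.length h; simp at this; omega
      exact Or.inl ⟨h5t, h.symm⟩
    · rw [List.prefix_iff_eq_take] at h
      by_cases h5t : 5 ≤ t.length
      · have hl : (t.take 5).length = 5 := by simp; omega
        rw [hl] at h
        exact Or.inl ⟨h5t, h⟩
      · have ht4 : t.length = 4 := by omega
        have htt : t.take 5 = t := List.take_of_length_le (by omega)
        rw [htt] at h
        rw [ht4] at h
        exact Or.inr ⟨ht4, h⟩
  · rintro (⟨h5t, h⟩ | ⟨ht4, h⟩)
    · exact Or.inr (h ▸ List.take_prefix 5 s)
    · refine Or.inr ?_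
      have htt : t.take 5 = t := List.take_of_length_le (by omega)
      rw [htt, h]
      exact List.take_prefix 4 s

-- A's per-token test, when the focus term has length exactly 4.
theorem pv_tok4 (s t : List Char) (hs : s.length = 4) (ht : 4 ≤ t.length) :
    (s.take 5 <+: t ∨ t.take 5 <+: s) ↔ t.take 4 = s := by
  have hss : s.take 5 = s := List.take_of_length_le (by omega)
  constructor
  · rintro (h | h)
    · rw [hss, List.prefix_iff_eq_take, hs] at h
      exact h.symm
    · rw [List.prefix_iff_eq_take] at h
      by_cases h5t : 5 ≤ t.length
      · exfalso
        have := congrArg List.length h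
        simp at this; omega
      · have ht4 : t.length = 4 := by omega
        have htt : t.take 5 = t := List.take_of_length_le (by omega)
        rw [htt, ht4] at h
        have hs4 : s.take 4 = s := List.take_of_length_le (by omega)
        rw [h]
        simp [hs4]
  · intro h
    exact Or.inl (by rw [hss, ← h]; exact List.take_prefix 4 t)

-- Python's xs[:5] / xs[:4] on lists and strings are List.take.
theorem pv_slL5 (l : List Char) : PySem.List.slice l none (some 5) = l.take 5 := by
  simp [pysem]

theorem pv_sl5 (s : String) : (PySem.Str.slice s none (some 5)).toList = s.toList.take 5 := by
  simp [pysem]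

theorem pv_sl4 (s : String) : (PySem.Str.slice s none (some 4)).toList = s.toList.take 4 := by
  simp [pysem]

-- ===== VERDICT (by name: the statement is the Claim_ definition above) =====
theorem count_focus_overlap_py_spec : Claim_equal_count_focus_overlap_py := by
  intro ft at_ _
  unfold Spec_count_focus_overlap_py count_focus_overlap_py count_focus_overlap_py_alt
  by_cases he : (ft.isEmpty || at_.isEmpty) = true
  · simp only [he, if_true]
  · simp only [he]
    apply List.foldl_ext
    intro ov term _
    by_cases hmem : term ∈ at_
    · simp [hmem, PySem.Set.mem_ofList]
    · simp only [decide_eq_true_eq, PySem.Chars.startswith_iff, pysem, List.any_eq_true,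
        Bool.and_eq_true, Bool.or_eq_true, pv_slL5]
      have hc1 : at_.contains term = false := by simpa using hmem
      have hc2 : List.contains (PySem.Set.ofList at_) term = false := by
        simp [hmem, PySem.Set.mem_ofList]
      rw [hc1, hc2]
      simp only [Bool.false_eq_true, if_false]
      by_cases h5 : 5 ≤ term.toList.length
      · -- focus term of length ≥ 5
        have g1 : ¬ ((↑(List.take 5 term.toList).length : ℤ) < 4) := by
          rw [List.length_take]; push_cast; omega
        have g2 : (5:ℤ) ≤ ↑term.toList.length := by exact_mod_cast h5
        rw [if_neg g1, if_pos g2]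
        refine if_congr ?_ rfl rfl
        rw [List.contains_iff_mem, List.contains_iff_mem]
        simp only [PySem.Set.mem_ofList, List.mem_map, List.mem_filter, decide_eq_true_eq]
        constructor
        · rintro ⟨x, hx, hxl, hcond⟩
          have hxl' : 4 ≤ x.toList.length := by exact_mod_cast hxl
          rcases (pv_tok5 term.toList x.toList h5 hxl').mp hcond with ⟨h5x, heq⟩ | ⟨h4x, heq⟩
          · exact Or.inl ⟨x, ⟨hx, by exact_mod_cast h5x⟩,
              by rw [← String.toList_inj, pv_sl5, pv_sl5]; exact heq⟩
          · refine Or.inr ?_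
            have hxe : PySem.Str.slice term none (some 4) = x := by
              rw [← String.toList_inj, pv_sl4]; exact heq.symm
            rw [hxe]
            exact ⟨hx, by exact_mod_cast h4x⟩
        · rintro (⟨x, ⟨hx, hxl⟩, heq⟩ | ⟨hx4, hl4⟩)
          · have hxl' : 5 ≤ x.toList.length := by exact_mod_cast hxl
            refine ⟨x, hx, by exact_mod_cast (by omega : (4:ℤ) ≤ x.toList.length), ?_⟩
            refine (pv_tok5 term.toList x.toList h5 (by omega)).mpr (Or.inl ⟨hxl', ?_⟩)
            rw [← String.toList_inj, pv_sl5, pv_sl5] at heq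
            exact heq
          · -- the 4-char prefix of term is itself a token
            refine ⟨PySem.Str.slice term none (some 4), hx4, by exact_mod_cast le_of_eq hl4.symm, ?_⟩
            refine (pv_tok5 term.toList _ h5 (by exact_mod_cast le_of_eq hl4.symm)).mpr ?_
            exact Or.inr ⟨by exact_mod_cast hl4, by rw [pv_sl4]⟩
      · by_cases h4 : term.toList.length = 4
        · -- focus term of length exactly 4
          have g1 : ¬ ((↑(List.take 5 term.toList).length : ℤ) < 4) := by
            rw [List.length_take]; push_cast; omega
          have g2 : ¬ ((5:ℤ) ≤ ↑term.toList.length) := by omega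
          have g3 : ((term.toList.length : ℤ) = 4) := by exact_mod_cast h4
          rw [if_neg g1, if_neg g2, if_pos g3]
          refine if_congr ?_ rfl rfl
          rw [List.contains_iff_mem]
          simp only [PySem.Set.mem_ofList, List.mem_map, List.mem_filter, decide_eq_true_eq]
          constructor
          · rintro ⟨x, hx, hxl, hcond⟩
            have hxl' : 4 ≤ x.toList.length := by exact_mod_cast hxl
            have := (pv_tok4 term.toList x.toList h4 hxl').mp hcond
            exact ⟨x, ⟨hx, by exact_mod_cast hxl'⟩, by rw [← String.toList_inj, pv_sl4]; exact this⟩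
          · rintro ⟨x, ⟨hx, hxl⟩, heq⟩
            have hxl' : 4 ≤ x.toList.length := by exact_mod_cast hxl
            refine ⟨x, hx, by exact_mod_cast hxl', ?_⟩
            refine (pv_tok4 term.toList x.toList h4 hxl').mpr ?_
            rw [← String.toList_inj, pv_sl4] at heq
            exact heq
        · -- focus term shorter than 4 characters: both sides skip it
          have g1 : ((↑(List.take 5 term.toList).length : ℤ) < 4) := by
            rw [List.length_take]; push_cast; omega
          have g2 : ¬ ((5:ℤ) ≤ ↑term.toList.length) := by omega
          have g3 : ¬ ((term.toList.length : ℤ) = 4) := by omega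
          rw [if_pos g1, if_neg g2, if_neg g3]
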